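-- pv_equiv track=rewrite | github.com/thojor79/bacillus_c64 | convert/c64fy.py | sprite_recode_byte
-- ===== SOURCE A (Python) =====
-- swaptable = [0, 1, 3, 2]
--
-- def sprite_recode_byte(b, hiresmode):
-- 	if hiresmode:
-- 		return b
-- 	bresult = 0
-- 	for i in range(0, 4):
-- 		b2 = (b >> (i*2)) & 3
-- 		b2 = swaptable[b2]
-- 		bresult += b2 << (i * 2)
-- 	return bresult
-- ===== SOURCE B (Python) =====
-- def sprite_recode_byte(b, hiresmode):
--     if hiresmode:
--         return b
--     lb = b % 256
--     return lb ^ ((lb & 0xAA) >> 1)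
-- ===== Notes on version B (the rewrite author's own statement) =====
-- stated objective: idiomatic
-- what changed: Replaces the 4-iteration loop over 2-bit pairs with a table lookup by a single branch-free bitwise expression: since each pair high:low maps to high:(low XOR high), the low byte lb = b % 256 recodes to lb ^ ((lb & 0xAA) >> 1).
import Mathlib
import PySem

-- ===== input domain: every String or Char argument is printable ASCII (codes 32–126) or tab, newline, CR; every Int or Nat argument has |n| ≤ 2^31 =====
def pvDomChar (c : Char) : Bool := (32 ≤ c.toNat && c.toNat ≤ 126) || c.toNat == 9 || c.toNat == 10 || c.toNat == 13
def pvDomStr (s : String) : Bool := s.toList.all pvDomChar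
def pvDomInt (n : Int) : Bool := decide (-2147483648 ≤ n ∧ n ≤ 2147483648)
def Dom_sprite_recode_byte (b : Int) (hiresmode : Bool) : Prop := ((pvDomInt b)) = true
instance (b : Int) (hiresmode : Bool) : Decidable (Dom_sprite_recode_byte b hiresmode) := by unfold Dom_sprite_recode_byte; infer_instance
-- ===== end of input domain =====

-- B replaces A's 4-iteration pair-swap loop with table lookups by one branch-free
-- bitwise expression on the low byte (same values; no speed claim).

-- ===== PORT A =====
def swaptable : List Int := [0, 1, 3, 2]

-- literal port of A; 'swaptable[b2]' has b2 = (b >> 2i) & 3 ∈ [0,3], always in range,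
-- so the pyGetD default 0 is never used.
def sprite_recode_byte (b : Int) (hiresmode : Bool) : Int :=
  if hiresmode then b
  else
    (PySem.List.pyRange 0 4 1).foldl (fun bresult i =>
      let k : Nat := (i * 2).toNat  -- the shift amount i*2 (i ∈ range(0,4), so nonnegative)
      let b2 := PySem.Int.band (b >>> k) 3
      let b2 := PySem.List.pyGetD swaptable b2 0
      bresult + (b2 <<< k)) 0

-- ===== PORT B =====
def sprite_recode_byte_alt (b : Int) (hiresmode : Bool) : Int :=
  if hiresmode then b
  else
    let lb := PySem.Int.mod b 256
    PySem.Int.bxor lb ((PySem.Int.band lb 170) >>> (1 : Nat))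

-- ===== PRECONDITION & SPEC =====
def Spec_sprite_recode_byte (b : Int) (hiresmode : Bool) (out : Int) : Prop := out = sprite_recode_byte_alt b hiresmode
instance (b : Int) (hiresmode : Bool) (out : Int) : Decidable (Spec_sprite_recode_byte b hiresmode out) := by unfold Spec_sprite_recode_byte; infer_instance

-- ===== CLAIM (what is proved, stated in full; the proofs are below) =====
def Claim_equal_sprite_recode_byte : Prop := ∀ (b : Int) (hiresmode : Bool), Dom_sprite_recode_byte b hiresmode → Spec_sprite_recode_byte b hiresmode (sprite_recode_byte b hiresmode)

-- ===== LEMMAS AND PROOFS =====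

-- x & 3 is the low 2 bits, i.e. x mod 4 (Python semantics, also for negative x)
theorem band_three (a : Int) : PySem.Int.band a 3 = a % 4 := by
  unfold PySem.Int.band
  simp only [show Int.toNat 3 = 3 from rfl]
  split_ifs with h1 h2 h2
  · have h : a.toNat &&& 3 = a.toNat % 4 := Nat.and_two_pow_sub_one_eq_mod a.toNat 2
    rw [h]; omega
  · omega
  · have h : (3 : Nat) &&& (-a - 1).toNat = (-a - 1).toNat % 4 := by
      rw [Nat.and_comm]; exact Nat.and_two_pow_sub_one_eq_mod (-a - 1).toNat 2
    rw [h]; omega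
  · omega

-- A's loop, unfolded and with each pair written as (b / 2^k) % 4
theorem portA_false (b : Int) :
    sprite_recode_byte b false =
      PySem.List.pyGetD swaptable (b % 4) 0 <<< (0 : Nat) +
      PySem.List.pyGetD swaptable (b / 4 % 4) 0 <<< (2 : Nat) +
      PySem.List.pyGetD swaptable (b / 16 % 4) 0 <<< (4 : Nat) +
      PySem.List.pyGetD swaptable (b / 64 % 4) 0 <<< (6 : Nat) := by
  have hr : PySem.List.pyRange 0 4 1 = [0, 1, 2, 3] := by decide
  show sprite_recode_byte b false = _
  unfold sprite_recode_byte
  rw [hr]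
  simp only [List.foldl, band_three, Int.shiftRight_eq_div_pow]
  norm_num [show Int.toNat 2 = 2 from rfl, show Int.toNat 4 = 4 from rfl,
    show Int.toNat 6 = 6 from rfl]

-- the whole equivalence, checked on all 256 residues
set_option maxRecDepth 10000 in
theorem key : ∀ n : Nat, n < 256 → sprite_recode_byte (↑n) false = sprite_recode_byte_alt (↑n) false := by
  decide

-- ===== VERDICT (by name: the statement is the Claim_ definition above) =====
theorem sprite_recode_byte_spec : Claim_equal_sprite_recode_byte := by
  intro b hiresmode _
  unfold Spec_sprite_recode_byte
  cases hiresmode with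
  | true => rfl
  | false =>
    set r : Int := b % 256 with hr
    have hr0 : 0 ≤ r := by omega
    have hr256 : r < 256 := by omega
    have hA : sprite_recode_byte b false = sprite_recode_byte r false := by
      rw [portA_false, portA_false]
      have h1 : b % 4 = r % 4 := by omega
      have h2 : b / 4 % 4 = r / 4 % 4 := by omega
      have h3 : b / 16 % 4 = r / 16 % 4 := by omega
      have h4 : b / 64 % 4 = r / 64 % 4 := by omega
      rw [h1, h2, h3, h4]
    have hB : sprite_recode_byte_alt b false = sprite_recode_byte_alt r false := by
      unfold sprite_recode_byte_alt
      simp only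
      have h : PySem.Int.mod b 256 = PySem.Int.mod r 256 := by
        simp only [PySem.Int.mod_eq_emod_of_pos (show (0:Int) < 256 by norm_num)]
        omega
      rw [h]
      simp
    have hcast : r = ((r.toNat : Nat) : Int) := by omega
    rw [hA, hB, hcast]
    exact key r.toNat (by omega)
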